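-- pv_equiv track=rewrite | github.com/eminogrande/emino-blog | scripts/process_mailbox.py | extract_emails
-- ===== SOURCE A (Python) =====
-- def extract_emails(mailbox_content):
--     """Extract all emails from mailbox file"""
--     emails = []
--     current_email = []
--
--     for line in mailbox_content.split('\n'):
--         if line.startswith('From ') and current_email:
--             emails.append('\n'.join(current_email))
--             current_email = []
--         current_email.append(line)
--
--     if current_email:
--         emails.append('\n'.join(current_email))
--
--     return emails
-- ===== SOURCE B (Python) =====
-- import re
--
-- def extract_emails(mailbox_content):
--     """Extract all emails from mailbox file"""
--     return re.split(r'\n(?=From )', mailbox_content)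
-- ===== Notes on version B (the rewrite author's own statement) =====
-- stated objective: idiomatic
-- what changed: Replaced the explicit line loop with its two accumulator lists and final flush by a single regex split on newlines that are immediately followed by 'From ' (re.split with a lookahead), so no per-line state is maintained.
import Mathlib
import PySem

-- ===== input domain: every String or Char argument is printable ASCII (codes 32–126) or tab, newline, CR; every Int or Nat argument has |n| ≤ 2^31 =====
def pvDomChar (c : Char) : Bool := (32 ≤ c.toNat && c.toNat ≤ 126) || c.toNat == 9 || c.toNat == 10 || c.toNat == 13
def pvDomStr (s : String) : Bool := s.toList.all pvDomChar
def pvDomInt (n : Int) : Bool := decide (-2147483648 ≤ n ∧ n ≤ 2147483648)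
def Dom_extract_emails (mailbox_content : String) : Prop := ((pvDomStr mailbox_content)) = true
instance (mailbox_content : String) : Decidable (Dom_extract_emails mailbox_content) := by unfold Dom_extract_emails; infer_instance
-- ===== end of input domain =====

-- B replaces A's line loop with two accumulators by one regex split on '\n(?=From )' (more idiomatic; same value everywhere).


-- ===== PORT A =====
-- the literal "From " tested by both programs
def pvFromPrefix : List Char := ['F', 'r', 'o', 'm', ' ']

-- the body of A's for-loop: state = (emails, current_email), chunks/lines as char lists
def pvAStep (st : List (List Char) × List (List Char)) (line : List Char) :
    List (List Char) × List (List Char) :=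
  let st' :=
    if PySem.Chars.startswith line pvFromPrefix && !st.2.isEmpty then
      (st.1 ++ [PySem.Chars.join ['\n'] st.2], ([] : List (List Char)))
    else st
  (st'.1, st'.2 ++ [line])

-- A's trailing "if current_email: emails.append('\n'.join(current_email))"
def pvFinalize (st : List (List Char) × List (List Char)) : List (List Char) :=
  if !st.2.isEmpty then st.1 ++ [PySem.Chars.join ['\n'] st.2] else st.1

def extract_emails (mailbox_content : String) : List String :=
  let res := (PySem.Chars.splitOn mailbox_content.toList ['\n']).foldl pvAStep ([], [])
  (pvFinalize res).map String.mk

-- ===== PORT B =====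
-- hand port of re.split(r'\n(?=From )', s): exact for this pattern — a split point is every '\n'
-- immediately followed by "From "; the '\n' is consumed, the lookahead is not.
def pvReSplit : List Char → List (List Char)
  | [] => [[]]
  | c :: rest =>
    if c = '\n' && pvFromPrefix.isPrefixOf rest then
      [] :: pvReSplit rest
    else
      match pvReSplit rest with
      | [] => [[c]]
      | x :: xs => (c :: x) :: xs

def extract_emails_alt (mailbox_content : String) : List String :=
  (pvReSplit mailbox_content.toList).map String.mk

-- ===== PRECONDITION & SPEC =====
def Spec_extract_emails (mailbox_content : String) (out : List String) : Prop := out = extract_emails_alt mailbox_content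
instance (mailbox_content : String) (out : List String) : Decidable (Spec_extract_emails mailbox_content out) := by unfold Spec_extract_emails; infer_instance

-- ===== CLAIM (what is proved, stated in full; the proofs are below) =====
def Claim_equal_extract_emails : Prop := ∀ (mailbox_content : String), Dom_extract_emails mailbox_content → Spec_extract_emails mailbox_content (extract_emails mailbox_content)

-- ===== LEMMAS AND PROOFS =====

-- the list of lines of a char list, split on '\n' (reference shape for splitOn)
def pvLines : List Char → List (List Char)
  | [] => [[]]
  | c :: r => if c = '\n' then [] :: pvLines r else
      match pvLines r with
      | [] => [[c]]
      | x :: xs => (c :: x) :: xs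

-- apply f to the first element
def pvMapHead (f : List Char → List Char) : List (List Char) → List (List Char)
  | [] => []
  | x :: xs => f x :: xs

-- the chunks of A's loop once the first line is in the buffer: acc = joined buffer, ls = remaining lines
def pvChunks (acc : List Char) : List (List Char) → List (List Char)
  | [] => [acc]
  | l :: ls => if pvFromPrefix.isPrefixOf l then acc :: pvChunks l ls else pvChunks (acc ++ '\n' :: l) ls

theorem pvLines_ne_nil (cs : List Char) : pvLines cs ≠ [] := by
  induction cs with
  | nil => simp [pvLines]
  | cons c r ih =>
    simp only [pvLines]
    split
    · simp
    · cases h : pvLines r with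
      | nil => simp
      | cons x xs => simp

theorem pvLines_cons_of_ne (c : Char) (r : List Char) (hc : c ≠ '\n') :
    pvLines (c :: r) = pvMapHead (c :: ·) (pvLines r) := by
  simp only [pvLines, if_neg hc]
  cases h : pvLines r with
  | nil => exact absurd h (pvLines_ne_nil r)
  | cons x xs => simp [pvMapHead]

theorem pvMapHead_nil_append (l : List (List Char)) : pvMapHead (fun x => [] ++ x) l = l := by
  cases l <;> simp [pvMapHead]

theorem pvMapHead_comp (f g : List Char → List Char) (l : List (List Char)) :
    pvMapHead f (pvMapHead g l) = pvMapHead (fun x => f (g x)) l := by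
  cases l <;> simp [pvMapHead]

-- PySem.Chars.splitOn on separator '\n' computes pvLines
theorem pvSplitOn_go (fuel : Nat) :
    ∀ (l cur : List Char) (acc : List (List Char)), l.length < fuel →
      PySem.Chars.splitOn.go ['\n'] fuel l cur acc
        = acc.reverse ++ pvMapHead (cur.reverse ++ ·) (pvLines l) := by
  induction fuel with
  | zero => intro l cur acc h; omega
  | succ fuel ih =>
    intro l cur acc h
    cases l with
    | nil => simp [PySem.Chars.splitOn.go, pvLines, pvMapHead]
    | cons c rest =>
      by_cases hc : c = '\n'
      · subst hc
        have hpre : List.isPrefixOf ['\n'] ('\n' :: rest) = true := by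
          simp [List.isPrefixOf]
        rw [show PySem.Chars.splitOn.go ['\n'] (fuel + 1) ('\n' :: rest) cur acc
              = PySem.Chars.splitOn.go ['\n'] fuel (List.drop (List.length ['\n']) ('\n' :: rest)) [] (cur.reverse :: acc) by
            simp [PySem.Chars.splitOn.go, hpre]]
        simp only [List.length_singleton, List.drop_succ_cons, List.drop_zero]
        rw [ih rest [] (cur.reverse :: acc) (by simpa using Nat.lt_of_succ_lt_succ h)]
        cases hlr : pvLines rest with
        | nil => exact absurd hlr (pvLines_ne_nil rest)
        | cons x xs => simp [pvLines, pvMapHead, hlr]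
      · have hpre : List.isPrefixOf ['\n'] (c :: rest) = false := by
          simp [List.isPrefixOf]
          exact fun hh => absurd hh.symm hc
        rw [show PySem.Chars.splitOn.go ['\n'] (fuel + 1) (c :: rest) cur acc
              = PySem.Chars.splitOn.go ['\n'] fuel rest (c :: cur) acc by
            simp [PySem.Chars.splitOn.go, hpre]]
        rw [ih rest (c :: cur) acc (by simpa using Nat.lt_of_succ_lt_succ h)]
        rw [pvLines_cons_of_ne c rest hc, pvMapHead_comp]
        congr 1
        cases pvLines rest <;> simp [pvMapHead]

theorem pvSplitOn_eq_pvLines (cs : List Char) :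
    PySem.Chars.splitOn cs ['\n'] = pvLines cs := by
  unfold PySem.Chars.splitOn
  rw [pvSplitOn_go (cs.length + 1) cs [] [] (by omega)]
  simpa using pvMapHead_nil_append (pvLines cs)

set_option maxRecDepth 4096 in
-- "From " is a prefix of r iff it is a prefix of r's first line (no char of "From " is '\n')
theorem pvPrefix_head_aux :
    ∀ (p : List Char), (∀ c ∈ p, c ≠ '\n') →
      ∀ (r : List Char), p.isPrefixOf (pvLines r).headI = p.isPrefixOf r := by
  intro p
  induction p with
  | nil => intro _ r; simp [List.isPrefixOf]
  | cons c p' ih =>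
    intro hp r
    have hc : c ≠ '\n' := hp c (by simp)
    cases r with
    | nil => simp [pvLines, List.isPrefixOf]
    | cons d r' =>
      by_cases hd : d = '\n'
      · subst hd
        have hL : (c :: p').isPrefixOf (pvLines ('\n' :: r')).headI = false := rfl
        have hR : (c :: p').isPrefixOf ('\n' :: r') = false := by
          simp only [List.isPrefixOf, Bool.and_eq_false_iff]
          left; simpa using hc
        rw [hL, hR]
      · rw [pvLines_cons_of_ne d r' hd]
        have hne := pvLines_ne_nil r'
        cases h : pvLines r' with
        | nil => exact absurd h hne
        | cons x xs =>
          simp only [pvMapHead, List.headI, List.isPrefixOf]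
          have := ih (fun e he => hp e (by simp [he])) r'
          rw [h] at this
          simp only [List.headI] at this
          rw [this]

theorem pvPrefix_head (r : List Char) :
    pvFromPrefix.isPrefixOf (pvLines r).headI = pvFromPrefix.isPrefixOf r :=
  pvPrefix_head_aux pvFromPrefix (by intro c hcm; fin_cases hcm <;> decide) r

-- accumulating into pvChunks' buffer only prepends onto the first chunk
theorem pvChunks_append (x : List Char) :
    ∀ (ls : List (List Char)) (a : List Char),
      pvChunks (x ++ a) ls = pvMapHead (x ++ ·) (pvChunks a ls) := by
  intro ls
  induction ls with
  | nil => intro a; simp [pvChunks, pvMapHead]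
  | cons l ls ih =>
    intro a
    simp only [pvChunks]
    split
    · simp [pvMapHead]
    · rw [List.append_assoc]
      exact ih (a ++ '\n' :: l)

theorem pvChunks_ne_nil (a : List Char) (ls : List (List Char)) : pvChunks a ls ≠ [] := by
  induction ls generalizing a with
  | nil => simp [pvChunks]
  | cons l ls ih =>
    simp only [pvChunks]
    split
    · simp
    · exact ih _

-- appending a line to a nonempty buffer appends "\n" + line to its join
theorem pvJoin_append (cur : List (List Char)) (l : List Char) (h : cur ≠ []) :
    PySem.Chars.join ['\n'] (cur ++ [l]) = PySem.Chars.join ['\n'] cur ++ '\n' :: l := by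
  induction cur with
  | nil => exact absurd rfl h
  | cons x xs ih =>
    cases xs with
    | nil =>
      rw [show ([x] ++ [l] : List (List Char)) = x :: l :: [] from rfl,
        PySem.Chars.join_cons_cons, PySem.Chars.join_singleton, PySem.Chars.join_singleton]
      simp
    | cons y ys =>
      rw [show ((x :: y :: ys) ++ [l] : List (List Char)) = x :: ((y :: ys) ++ [l]) from rfl,
        show ((y :: ys) ++ [l] : List (List Char)) = y :: (ys ++ [l]) from rfl,
        PySem.Chars.join_cons_cons,
        show (y :: (ys ++ [l]) : List (List Char)) = (y :: ys) ++ [l] from rfl,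
        ih (by simp), PySem.Chars.join_cons_cons]
      simp

-- A's fold, once the buffer is nonempty, computes pvChunks of the joined buffer
theorem pvFold_eq_chunks :
    ∀ (ls : List (List Char)) (emails cur : List (List Char)), cur ≠ [] →
      pvFinalize (ls.foldl pvAStep (emails, cur))
        = emails ++ pvChunks (PySem.Chars.join ['\n'] cur) ls := by
  intro ls
  induction ls with
  | nil =>
    intro emails cur hcur
    simp [pvFinalize, pvChunks, hcur]
  | cons l ls ih =>
    intro emails cur hcur
    simp only [List.foldl_cons]
    by_cases hf : pvFromPrefix.isPrefixOf l
    · have hstep : pvAStep (emails, cur) l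
          = (emails ++ [PySem.Chars.join ['\n'] cur], [l]) := by
        simp [pvAStep, PySem.Chars.startswith, hf, hcur]
      rw [hstep, ih _ [l] (by simp)]
      simp [pvChunks, hf, PySem.Chars.join_singleton]
    · have hstep : pvAStep (emails, cur) l = (emails, cur ++ [l]) := by
        simp [pvAStep, PySem.Chars.startswith, hf]
      rw [hstep, ih _ (cur ++ [l]) (by simp), pvJoin_append cur l hcur]
      simp [pvChunks, hf]

-- B's char scan computes pvChunks over the line decomposition
theorem pvReSplit_eq_chunks :
    ∀ (cs : List Char) (l1 : List Char) (ls : List (List Char)),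
      pvLines cs = l1 :: ls → pvReSplit cs = pvChunks l1 ls := by
  intro cs
  induction cs with
  | nil =>
    intro l1 ls h
    simp only [pvLines] at h
    cases h
    simp [pvReSplit, pvChunks]
  | cons c r ih =>
    intro l1 ls h
    by_cases hc : c = '\n'
    · subst hc
      simp only [pvLines, if_pos] at h
      injection h with h1 h2
      subst h1
      cases hr : pvLines r with
      | nil => exact absurd hr (pvLines_ne_nil r)
      | cons m1 ms =>
        rw [hr] at h2; subst h2
        have hhead : pvFromPrefix.isPrefixOf m1 = pvFromPrefix.isPrefixOf r := by
          have := pvPrefix_head r; rw [hr] at this; simpa using this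
        by_cases hf : pvFromPrefix.isPrefixOf r
        · have hm : pvFromPrefix.isPrefixOf m1 = true := by rw [hhead]; exact hf
          have hB : pvReSplit ('\n' :: r) = [] :: pvReSplit r := by
            simp [pvReSplit, hf]
          have hA : pvChunks [] (m1 :: ms) = [] :: pvChunks m1 ms := by
            simp [pvChunks, List.isPrefixOf_iff_prefix.mp hm]
          rw [hB, hA, ih m1 ms hr]
        · have hm : ¬ (pvFromPrefix <+: m1) := by
            intro hp
            exact hf (by rw [← hhead]; exact List.isPrefixOf_iff_prefix.mpr hp)
          have hA : pvChunks [] (m1 :: ms) = pvChunks (['\n'] ++ m1) ms := by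
            simp [pvChunks, hm]
          cases hcm : pvChunks m1 ms with
          | nil => exact absurd hcm (pvChunks_ne_nil m1 ms)
          | cons y ys =>
            have hB : pvReSplit ('\n' :: r) = ('\n' :: y) :: ys := by
              simp [pvReSplit, hf, ih m1 ms hr, hcm]
            rw [hB, hA, pvChunks_append, hcm]
            simp [pvMapHead]
    · rw [pvLines_cons_of_ne c r hc] at h
      cases hr : pvLines r with
      | nil => exact absurd hr (pvLines_ne_nil r)
      | cons m1 ms =>
        rw [hr] at h
        simp only [pvMapHead] at h
        injection h with h1 h2
        subst h1; subst h2
        cases hcm : pvChunks m1 ms with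
        | nil => exact absurd hcm (pvChunks_ne_nil m1 ms)
        | cons y ys =>
          have hB : pvReSplit (c :: r) = (c :: y) :: ys := by
            simp [pvReSplit, hc, ih m1 ms hr, hcm]
          rw [hB, show (c :: m1 : List Char) = [c] ++ m1 from rfl, pvChunks_append, hcm]
          simp [pvMapHead]

theorem pvMain (s : String) : extract_emails s = extract_emails_alt s := by
  unfold extract_emails extract_emails_alt
  rw [pvSplitOn_eq_pvLines]
  cases hl : pvLines s.toList with
  | nil => exact absurd hl (pvLines_ne_nil s.toList)
  | cons l1 ls =>
    have hstep : pvAStep ([], []) l1 = ([], [l1]) := by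
      simp [pvAStep]
    have hfold := pvFold_eq_chunks ls [] [l1] (by simp)
    rw [PySem.Chars.join_singleton] at hfold
    simp only [List.foldl_cons, hstep]
    rw [hfold, pvReSplit_eq_chunks s.toList l1 ls hl]
    simp

-- ===== VERDICT (by name: the statement is the Claim_ definition above) =====
theorem extract_emails_spec : Claim_equal_extract_emails := by
  intro s _
  unfold Spec_extract_emails
  exact pvMain s
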